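-- pv_equiv track=rewrite | github.com/natitedros/Competitive-Programming | PlaygroundCodes/OA_2.py | solve
-- ===== SOURCE A (Python) =====
-- import math
-- from collections import defaultdict
--
-- def solve(nums):
--     freq = defaultdict(int)
--     sides = []
--     for num in nums:
--         freq[num] += 1
--         if freq[num] == 4:
--             return 0
--         if freq[num] == 2:
--             sides.append(num)
--     minDistance = math.inf
--     sides.sort()
--     for i in range(1, len(sides)):
--         minDistance = min(minDistance, sides[i]-sides[i-1])
--     return minDistance if minDistance != math.inf else -1
-- ===== SOURCE B (Python) =====
-- def solve(nums):
--     s = sorted(nums)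
--     sides = []
--     i = 0
--     n = len(s)
--     while i < n:
--         j = i
--         while j < n and s[j] == s[i]:
--             j += 1
--         run = j - i
--         if run >= 4:
--             return 0
--         if run >= 2:
--             sides.append(s[i])
--         i = j
--     if len(sides) < 2:
--         return -1
--     return min(b - a for a, b in zip(sides, sides[1:]))
-- ===== Notes on version B (the rewrite author's own statement) =====
-- stated objective: alternative
-- what changed: Replaced A's hash-map frequency counting pass (plus a separate sort of the duplicated values) by a single sort of the whole input followed by a run-length scan of adjacent equal elements; the duplicated values then come out already sorted and the minimum adjacent gap is taken over them directly.
import Mathlib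
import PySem

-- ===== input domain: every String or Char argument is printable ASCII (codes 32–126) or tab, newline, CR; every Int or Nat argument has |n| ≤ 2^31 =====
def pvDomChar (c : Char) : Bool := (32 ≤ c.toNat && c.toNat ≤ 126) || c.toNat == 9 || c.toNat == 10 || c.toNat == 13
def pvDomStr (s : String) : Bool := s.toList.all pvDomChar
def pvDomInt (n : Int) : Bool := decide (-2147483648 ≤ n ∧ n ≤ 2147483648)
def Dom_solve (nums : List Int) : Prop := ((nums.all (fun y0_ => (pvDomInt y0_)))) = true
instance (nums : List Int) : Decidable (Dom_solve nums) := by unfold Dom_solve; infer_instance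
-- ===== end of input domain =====

-- B replaces A's hash-map frequency pass by a single sort followed by a run-length scan of
-- adjacent equal elements (objective: alternative decomposition, same exact results).

-- ===== PORT A =====
-- the main for-loop of A: returns none when the 'return 0' fires (freq[num] == 4),
-- otherwise the final 'sides' list
def solveLoopA : List Int → PySem.Dict Int Int → List Int → Option (List Int)
  | [], _, sides => some sides
  | num :: rest, freq, sides =>
    let freq' := freq.insert num (freq.getD num 0 + 1)
    if freq'.getD num 0 = 4 then none
    else if freq'.getD num 0 = 2 then solveLoopA rest freq' (sides ++ [num])
    else solveLoopA rest freq' sides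

def solve (nums : List Int) : Int :=
  match solveLoopA nums PySem.Dict.empty [] with
  | none => 0
  | some sides0 =>
    let sides := PySem.List.sorted sides0 (fun x => x) false
    -- minDistance : none plays math.inf; min(inf, d) = d
    let minDistance : Option Int :=
      (PySem.List.pyRange 1 sides.length 1).foldl
        (fun acc i =>
          some (match acc with
                | none => PySem.List.pyGetD sides i 0 - PySem.List.pyGetD sides (i - 1) 0
                | some m => min m (PySem.List.pyGetD sides i 0 - PySem.List.pyGetD sides (i - 1) 0)))
        none
    match minDistance with
    | none => -1
    | some m => m

-- ===== PORT B =====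
-- the while-loop of Source B: scans the sorted list run by run (run = block of equal adjacent
-- elements); none when a run has length >= 4, otherwise the collected 'sides'
def runScanB : List Int → Option (List Int)
  | [] => some []
  | x :: rest =>
    let run := 1 + (rest.takeWhile (fun y => y == x)).length
    if 4 ≤ run then none
    else
      match runScanB (rest.dropWhile (fun y => y == x)) with
      | none => none
      | some sides => some (if 2 ≤ run then x :: sides else sides)
  termination_by s => s.length
  decreasing_by
    simp only [List.length_cons]
    exact Nat.lt_succ_of_le (List.length_dropWhile_le _ _)

def solve_alt (nums : List Int) : Int :=
  match runScanB (PySem.List.sorted nums (fun x => x) false) with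
  | none => 0
  | some sides =>
    if sides.length < 2 then -1
    else
      match PySem.List.min? ((sides.zip sides.tail).map (fun p => p.2 - p.1)) (fun x => x) with
      | none => -1
      | some m => m

-- ===== PRECONDITION & SPEC =====
def Spec_solve (nums : List Int) (out : Int) : Prop := out = solve_alt nums
instance (nums : List Int) (out : Int) : Decidable (Spec_solve nums out) := by unfold Spec_solve; infer_instance

-- ===== CLAIM (what is proved, stated in full; the proofs are below) =====
def Claim_equal_solve : Prop := ∀ (nums : List Int), Dom_solve nums → Spec_solve nums (solve nums)

-- ===== LEMMAS AND PROOFS =====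

-- characterisation of A's main loop
theorem loopA_spec (rest : List Int) (freq : PySem.Dict Int Int) (sides : List Int)
    (h0 : ∀ v, 0 ≤ freq.getD v 0) (hle : ∀ v, freq.getD v 0 ≤ 3)
    (hnd : sides.Nodup) (hmem : ∀ v, v ∈ sides ↔ 2 ≤ freq.getD v 0) :
    (solveLoopA rest freq sides = none ↔ ∃ v, 4 ≤ freq.getD v 0 + (rest.count v : Int))
    ∧ (∀ s, solveLoopA rest freq sides = some s →
        s.Nodup ∧ ∀ v, v ∈ s ↔ 2 ≤ freq.getD v 0 + (rest.count v : Int)) := by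
  induction rest generalizing freq sides with
  | nil =>
    simp only [solveLoopA]
    refine ⟨⟨fun h => by simp at h, fun h => ?_⟩, fun s hs => ?_⟩
    · exfalso; obtain ⟨v, hv⟩ := h; have := hle v; simp at hv; omega
    · cases hs; exact ⟨hnd, fun v => by simpa using hmem v⟩
  | cons num rest ih =>
    have hins : ∀ v, (freq.insert num (freq.getD num 0 + 1)).getD v 0
        = if v = num then freq.getD num 0 + 1 else freq.getD v 0 := by
      intro v; rw [PySem.Dict.getD_insert]
    have hpt : ∀ v, (freq.insert num (freq.getD num 0 + 1)).getD v 0 + (rest.count v : Int)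
        = freq.getD v 0 + (((num :: rest).count v : Nat) : Int) := by
      intro v
      rw [hins v, List.count_cons]
      by_cases hv : v = num <;> simp [hv] <;> push_cast <;> omega
    have hc : (freq.insert num (freq.getD num 0 + 1)).getD num 0 = freq.getD num 0 + 1 := by
      rw [hins num]; simp
    simp only [solveLoopA, hc]
    split_ifs with h4 h2
    · refine ⟨⟨fun _ => ⟨num, ?_⟩, fun _ => rfl⟩, fun s hs => hs.elim⟩
      have hcc : (num :: rest).count num = rest.count num + 1 := by simp
      rw [hcc]; push_cast; omega
    · -- count becomes 2
      have hnum : ¬ (2 ≤ freq.getD num 0) := by omega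
      have hnotmem : num ∉ sides := fun h => hnum ((hmem num).mp h)
      have h0' : ∀ v, 0 ≤ (freq.insert num (freq.getD num 0 + 1)).getD v 0 := by
        intro v; rw [hins v]; split_ifs <;> [skip; exact h0 v] <;> have := h0 num <;> omega
      have hle' : ∀ v, (freq.insert num (freq.getD num 0 + 1)).getD v 0 ≤ 3 := by
        intro v; rw [hins v]; split_ifs <;> [omega; exact hle v]
      have hnd' : (sides ++ [num]).Nodup := by
        simp [List.nodup_append, hnd]
        exact fun a ha h => hnotmem (h ▸ ha)
      have hmem' : ∀ v, v ∈ sides ++ [num] ↔ 2 ≤ (freq.insert num (freq.getD num 0 + 1)).getD v 0 := by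
        intro v; rw [hins v]
        by_cases hv : v = num
        · subst hv; simp; omega
        · simp [hv, hmem v]
      obtain ⟨IH1, IH2⟩ := ih _ _ h0' hle' hnd' hmem'
      simp only [hpt] at IH1 IH2
      exact ⟨IH1, IH2⟩
    · -- count is 1 or ≥ 3
      have h0' : ∀ v, 0 ≤ (freq.insert num (freq.getD num 0 + 1)).getD v 0 := by
        intro v; rw [hins v]; split_ifs <;> [skip; exact h0 v] <;> have := h0 num <;> omega
      have hle' : ∀ v, (freq.insert num (freq.getD num 0 + 1)).getD v 0 ≤ 3 := by
        intro v; rw [hins v]; split_ifs with hv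
        · have := hle num; omega
        · exact hle v
      have hmem' : ∀ v, v ∈ sides ↔ 2 ≤ (freq.insert num (freq.getD num 0 + 1)).getD v 0 := by
        intro v; rw [hins v]
        by_cases hv : v = num
        · subst hv; rw [if_pos rfl]
          have := h0 v; rw [hmem v]
          constructor <;> intro <;> omega
        · simp [hv, hmem v]
      obtain ⟨IH1, IH2⟩ := ih _ _ h0' hle' hnd hmem'
      simp only [hpt] at IH1 IH2
      exact ⟨IH1, IH2⟩

-- on a sorted list whose elements are all ≥ x, everything left after dropping the x's is > x
theorem dropWhile_gt (x : Int) : ∀ (l : List Int), (∀ y ∈ l, x ≤ y) → l.Pairwise (· ≤ ·) →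
    ∀ y ∈ l.dropWhile (fun y => y == x), x < y := by
  intro l
  induction l with
  | nil => intro _ _ y hy; simp at hy
  | cons a l ih =>
    intro hge hpw y hy
    rw [List.dropWhile_cons] at hy
    by_cases ha : a = x
    · simp only [ha, beq_self_eq_true, if_pos rfl] at hy
      exact ih (fun z hz => hge z (List.mem_cons_of_mem _ hz)) (List.Pairwise.sublist (List.sublist_cons_self _ _) hpw) y hy
    · simp only [beq_iff_eq, ha, if_neg] at hy
      have hxa : x < a := lt_of_le_of_ne (hge a (List.mem_cons_self)) (fun h => ha h.symm)
      rcases List.mem_cons.mp hy with h | h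
      · exact h ▸ hxa
      · exact lt_of_lt_of_le hxa ((List.pairwise_cons.mp hpw).1 y h)

theorem scanB_spec : ∀ (s : List Int), s.Pairwise (· ≤ ·) →
    (runScanB s = none ↔ ∃ v, 4 ≤ (s.count v : Int))
    ∧ (∀ out, runScanB s = some out →
        out.Pairwise (· < ·) ∧ ∀ v, v ∈ out ↔ 2 ≤ (s.count v : Int)) := by
  have main : ∀ (n : Nat) (s : List Int), s.length ≤ n → s.Pairwise (· ≤ ·) →
      (runScanB s = none ↔ ∃ v, 4 ≤ (s.count v : Int))
      ∧ (∀ out, runScanB s = some out →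
          out.Pairwise (· < ·) ∧ ∀ v, v ∈ out ↔ 2 ≤ (s.count v : Int)) := by
    intro n
    induction n with
    | zero =>
      intro s hlen _
      have : s = [] := List.length_eq_zero_iff.mp (Nat.le_zero.mp hlen)
      subst this
      rw [runScanB]
      refine ⟨⟨fun h => by simp at h, fun ⟨v, hv⟩ => by simp at hv⟩, fun out hout => ?_⟩
      cases hout
      exact ⟨List.Pairwise.nil, fun v => by simp⟩
    | succ n ih =>
      intro s hlen hs
      match s with
      | [] =>
        rw [runScanB]
        refine ⟨⟨fun h => by simp at h, fun ⟨v, hv⟩ => by simp at hv⟩, fun out hout => ?_⟩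
        cases hout
        exact ⟨List.Pairwise.nil, fun v => by simp⟩
      | x :: rest =>
        have hxle : ∀ y ∈ rest, x ≤ y := (List.pairwise_cons.mp hs).1
        have hrestpw : rest.Pairwise (· ≤ ·) := (List.pairwise_cons.mp hs).2
        have hdgt : ∀ y ∈ rest.dropWhile (fun y => y == x), x < y := dropWhile_gt x rest hxle hrestpw
        have hsplit : rest.takeWhile (fun y => y == x) ++ rest.dropWhile (fun y => y == x) = rest :=
          List.takeWhile_append_dropWhile
        have htake : ∀ y ∈ rest.takeWhile (fun y => y == x), y = x := by
          intro y hy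
          have := List.mem_takeWhile_imp hy
          simpa using this
        have hdnotx : x ∉ rest.dropWhile (fun y => y == x) := fun h => lt_irrefl x (hdgt x h)
        -- counts
        have h1 : (rest.takeWhile (fun y => y == x)).count x
            = (rest.takeWhile (fun y => y == x)).length :=
          List.count_eq_length.mpr (fun b hb => (htake b hb).symm)
        have h2 : (rest.dropWhile (fun y => y == x)).count x = 0 :=
          List.count_eq_zero.mpr hdnotx
        have hcx : (x :: rest).count x = 1 + (rest.takeWhile (fun y => y == x)).length := by
          conv_lhs => rw [← hsplit]
          rw [List.count_cons, List.count_append, h1, h2]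
          simp
          omega
        have hcv : ∀ v, v ≠ x → (x :: rest).count v = (rest.dropWhile (fun y => y == x)).count v := by
          intro v hv
          have h3 : (rest.takeWhile (fun y => y == x)).count v = 0 :=
            List.count_eq_zero.mpr (fun h => hv (htake v h))
          conv_lhs => rw [← hsplit]
          rw [List.count_cons, List.count_append, h3]
          simp [Ne.symm hv]
        have hdlen : (rest.dropWhile (fun y => y == x)).length ≤ n := by
          have h1 := List.length_dropWhile_le (fun y => (y == x)) rest
          simp at hlen; omega
        have hdpw : (rest.dropWhile (fun y => y == x)).Pairwise (· ≤ ·) :=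
          List.Pairwise.sublist (List.dropWhile_sublist _) hrestpw
        obtain ⟨IH1, IH2⟩ := ih (rest.dropWhile (fun y => y == x)) hdlen hdpw
        rw [runScanB]
        by_cases h4 : 4 ≤ 1 + (rest.takeWhile (fun y => y == x)).length
        · rw [if_pos h4]
          refine ⟨⟨fun _ => ⟨x, ?_⟩, fun _ => rfl⟩, fun out hout => by simp at hout⟩
          rw [hcx]; push_cast; omega
        · rw [if_neg h4]
          cases hres : runScanB (rest.dropWhile (fun y => y == x)) with
          | none =>
            refine ⟨⟨fun _ => ?_, fun _ => rfl⟩, fun out hout => by simp at hout⟩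
            obtain ⟨v, hv⟩ := IH1.mp hres
            have hvx : v ≠ x := by
              intro h; subst h
              rw [List.count_eq_zero.mpr hdnotx] at hv; simp at hv
            exact ⟨v, by rw [hcv v hvx]; exact hv⟩
          | some sides =>
            obtain ⟨hpw, hmem⟩ := IH2 sides hres
            have hsidesgt : ∀ y ∈ sides, x < y := by
              intro y hy
              have : 2 ≤ ((rest.dropWhile (fun y => y == x)).count y : Int) := (hmem y).mp hy
              have : 0 < (rest.dropWhile (fun y => y == x)).count y := by omega
              exact hdgt y (List.count_pos_iff.mp this)
            refine ⟨⟨fun h => by simp at h, fun h => ?_⟩, fun out hout => ?_⟩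
            · -- derive a contradiction: no value has count ≥ 4
              exfalso
              obtain ⟨v, hv⟩ := h
              by_cases hvx : v = x
              · subst hvx; rw [hcx] at hv; push_cast at hv; omega
              · rw [hcv v hvx] at hv
                have := IH1.mpr ⟨v, hv⟩
                rw [hres] at this; simp at this
            · cases hout
              constructor
              · split_ifs with h2
                · exact List.pairwise_cons.mpr ⟨hsidesgt, hpw⟩
                · exact hpw
              · intro v
                by_cases hvx : v = x
                · subst hvx
                  have hnot : v ∉ sides := fun h => lt_irrefl v (hsidesgt v h)
                  rw [hcx]
                  split_ifs with h2
                  · simp only [List.mem_cons]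
                    push_cast
                    constructor
                    · intro _; omega
                    · intro _; exact Or.inl trivial
                  · push_cast
                    constructor
                    · intro h; exact absurd h hnot
                    · intro h; omega
                · rw [hcv v hvx, ← hmem v]
                  split_ifs with h2
                  · simp [hvx]
                  · rfl
  intro s hs
  exact main s.length s le_rfl hs

theorem optmin_fold (l : List Int) (g : Int → Int) :
    ∀ init, l.foldl (fun acc i => some (match acc with
        | none => g i | some m => min m (g i))) init
      = (l.map g).foldl (fun acc d => some (match acc with
        | none => d | some m => min m d)) init := by
  induction l with
  | nil => intro init; rfl
  | cons a l ih => intro init; simp only [List.map, List.foldl]; exact ih _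

theorem some_fold (t : List Int) : ∀ a : Int,
    t.foldl (fun acc d => some (match acc with
      | none => d | some m => min m d)) (some a) = some (t.foldl min a) := by
  induction t with
  | nil => intro a; rfl
  | cons b t ih => intro a; simp only [List.foldl]; exact ih _

theorem diffs_map (s : List Int) :
    (PySem.List.pyRange 1 (s.length : Int) 1).map
      (fun i => PySem.List.pyGetD s i 0 - PySem.List.pyGetD s (i - 1) 0)
    = (s.zip s.tail).map (fun p => p.2 - p.1) := by
  apply List.ext_getElem
  · simp [PySem.List.length_pyRange_one]
  · intro k h1 h2
    simp only [List.getElem_map, PySem.List.getElem_pyRange_one]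
    have hk : k < s.length - 1 := by
      simp [PySem.List.length_pyRange_one] at h1; omega
    have e1 : (1 : Int) + (k : Int) = ((k + 1 : Nat) : Int) := by push_cast; ring
    have e2 : ((k + 1 : Nat) : Int) - 1 = ((k : Nat) : Int) := by push_cast; ring
    rw [e1, e2, PySem.List.pyGetD_natCast, PySem.List.pyGetD_natCast,
      List.getElem_zip]
    simp only [List.getElem_tail]
    rw [List.getD_eq_getElem s 0 (by omega), List.getD_eq_getElem s 0 (by omega)]

theorem final_eq (s : List Int) :
    (match (PySem.List.pyRange 1 s.length 1).foldl
        (fun acc i =>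
          some (match acc with
                | none => PySem.List.pyGetD s i 0 - PySem.List.pyGetD s (i - 1) 0
                | some m => min m (PySem.List.pyGetD s i 0 - PySem.List.pyGetD s (i - 1) 0)))
        none with
     | none => (-1 : Int)
     | some m => m)
    = (if s.length < 2 then (-1 : Int)
       else match PySem.List.min? ((s.zip s.tail).map (fun p => p.2 - p.1)) (fun x => x) with
            | none => -1
            | some m => m) := by
  rw [optmin_fold, diffs_map]
  cases hd : (s.zip s.tail).map (fun p => p.2 - p.1) with
  | nil =>
    simp only [List.foldl]
    split_ifs with hlen <;> rfl
  | cons a t =>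
    have hlen2 : ¬ (s.length < 2) := by
      have := congrArg List.length hd
      simp at this
      omega
    rw [if_neg hlen2]
    simp only [List.foldl]
    rw [some_fold, PySem.List.min?_id_cons]



-- ===== VERDICT (by name: the statement is the Claim_ definition above) =====
theorem solve_spec : Claim_equal_solve := by
  unfold Claim_equal_solve
  intro nums _
  unfold Spec_solve solve solve_alt
  have h0 : ∀ v : Int, 0 ≤ (PySem.Dict.empty : PySem.Dict Int Int).getD v 0 := by
    intro v; simp
  have hle : ∀ v : Int, (PySem.Dict.empty : PySem.Dict Int Int).getD v 0 ≤ 3 := by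
    intro v; simp
  have hmem0 : ∀ v : Int, v ∈ ([] : List Int) ↔ 2 ≤ (PySem.Dict.empty : PySem.Dict Int Int).getD v 0 := by
    intro v; simp
  obtain ⟨A1, A2⟩ := loopA_spec nums PySem.Dict.empty [] h0 hle List.nodup_nil hmem0
  have hSpw : (PySem.List.sorted nums (fun x => x) false).Pairwise (· ≤ ·) :=
    PySem.List.sorted_pairwise nums (fun x => x)
  obtain ⟨B1, B2⟩ := scanB_spec (PySem.List.sorted nums (fun x => x) false) hSpw
  have hcnt : ∀ v, (PySem.List.sorted nums (fun x => x) false).count v = nums.count v :=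
    fun v => (PySem.List.sorted_perm nums (fun x => x) false).count_eq v
  cases hA0 : solveLoopA nums PySem.Dict.empty [] with
  | none =>
    obtain ⟨v, hv⟩ := A1.mp hA0
    simp at hv
    have hBn : runScanB (PySem.List.sorted nums (fun x => x) false) = none :=
      B1.mpr ⟨v, by rw [hcnt v]; exact_mod_cast hv⟩
    rw [hBn]
  | some sa =>
    obtain ⟨hndA, hmemA⟩ := A2 sa hA0
    cases hB0 : runScanB (PySem.List.sorted nums (fun x => x) false) with
    | none =>
      exfalso
      obtain ⟨v, hv⟩ := B1.mp hB0
      rw [hcnt v] at hv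
      have h4 : 4 ≤ (PySem.Dict.empty : PySem.Dict Int Int).getD v 0 + (nums.count v : Int) := by
        simp; omega
      have := A1.mpr ⟨v, h4⟩
      rw [hA0] at this; simp at this
    | some sb =>
      obtain ⟨hpwB, hmemB⟩ := B2 sb hB0
      have hndB : sb.Nodup := hpwB.imp (fun h => ne_of_lt h)
      have hperm : sb.Perm sa := by
        rw [List.perm_ext_iff_of_nodup hndB hndA]
        intro v
        rw [hmemB v, hmemA v, hcnt v]
        simp
      dsimp only
      have hse : PySem.List.sorted sa (fun x => x) false = sb :=
        PySem.List.sorted_eq_of_perm_of_pairwise_lt sa sb (fun x => x) hperm hpwB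
      rw [hse]
      exact final_eq sb
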